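-- pv_equiv track=rewrite | github.com/Aryudesu/ABC | ABC/200_299/237/C.py | calc
-- ===== SOURCE A (Python) =====
-- def calc(S):
--     l = 0
--     r = len(S) - 1
--     lc = 0
--     rc = 0
--     while True:
--         if S[l] == "a":
--             l += 1
--             lc += 1
--         if S[r] == "a":
--             r -= 1
--             rc += 1
--         if l >= r:
--             if lc > rc:
--                 return False
--             return True
--         if S[l] != "a" and S[r] != "a":
--             break
--     if lc > rc:
--         return False
--     while True:
--         if S[l] == S[r]:
--             l += 1
--             r -= 1
--         else:
--             return False
--         if l >= r:
--             return S[l] == S[r]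
--     return True
-- ===== SOURCE B (Python) =====
-- # Three-phase rewrite: count the leading and trailing 'a'-runs, compare them,
-- # then do a single reverse-and-compare palindrome test on the core slice.
-- def _arun(s):
--     # length of the leading run of 'a' characters
--     k = 0
--     while k < len(s) and s[k] == "a":
--         k += 1
--     return k
--
--
-- def calc(S):
--     n = len(S)
--     lc = _arun(S)
--     rc = _arun(S[::-1])
--     if lc > rc:
--         return False
--     core = S[lc:n - rc]
--     return core == core[::-1]
-- ===== Notes on version B (the rewrite author's own statement) =====
-- stated objective: simpler
-- what changed: A's single interleaved two-pointer loop (stripping the letter a from both ends in lockstep and then comparing inward) is replaced by three independent phases: count the leading run of that letter, count the trailing run, compare the counts, and test the remaining core slice by reverse-and-compare.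
-- crash fix: On the empty string A raises IndexError (it reads S[0] unconditionally) while B returns True; Pre_ excludes the empty string. — e.g. on calc(""): A raises IndexError, B returns true
import Mathlib
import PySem

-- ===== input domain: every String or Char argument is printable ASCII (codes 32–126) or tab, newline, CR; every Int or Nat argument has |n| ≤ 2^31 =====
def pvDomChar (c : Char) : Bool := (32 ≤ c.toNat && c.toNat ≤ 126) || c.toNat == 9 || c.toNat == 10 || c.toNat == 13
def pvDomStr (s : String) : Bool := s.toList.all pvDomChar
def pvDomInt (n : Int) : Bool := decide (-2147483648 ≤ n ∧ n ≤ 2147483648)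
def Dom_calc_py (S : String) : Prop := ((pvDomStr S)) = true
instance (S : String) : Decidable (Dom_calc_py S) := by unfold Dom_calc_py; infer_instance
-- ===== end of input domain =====

-- B replaces A's interleaved two-pointer loop by three phases (count leading
-- 'a'-run, count trailing 'a'-run, reverse-and-compare the core slice);
-- equivalence is proved for all nonempty strings (A raises IndexError on "").

-- ===== PORT A =====
-- second inner while-loop of A (two-pointer palindrome scan); fuel realises 'while True'
def calcALoop2 (cs : List Char) (l r : Int) : Nat → Bool
  | 0 => false
  | fuel + 1 =>
    match PySem.List.pyGet? cs l, PySem.List.pyGet? cs r with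
    | some cl, some cr =>
      if cl == cr then
        let l := l + 1
        let r := r - 1
        if l ≥ r then
          match PySem.List.pyGet? cs l, PySem.List.pyGet? cs r with
          | some cl2, some cr2 => cl2 == cr2
          | _, _ => false
        else calcALoop2 cs l r fuel
      else false
    | _, _ => false

-- first while-loop of A (strip 'a's from both ends in lockstep, counting)
def calcALoop1 (cs : List Char) (l r lc rc : Int) : Nat → Bool
  | 0 => false
  | fuel + 1 =>
    match PySem.List.pyGet? cs l with
    | none => false
    | some cl =>
      let l := if cl == 'a' then l + 1 else l
      let lc := if cl == 'a' then lc + 1 else lc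
      match PySem.List.pyGet? cs r with
      | none => false
      | some cr =>
        let r := if cr == 'a' then r - 1 else r
        let rc := if cr == 'a' then rc + 1 else rc
        if l ≥ r then
          if lc > rc then false else true
        else
          match PySem.List.pyGet? cs l, PySem.List.pyGet? cs r with
          | some cl2, some cr2 =>
            if cl2 != 'a' && cr2 != 'a' then
              if lc > rc then false else calcALoop2 cs l r (cs.length + 1)
            else calcALoop1 cs l r lc rc fuel
          | _, _ => false

def calc_py (S : String) : Bool :=
  let cs := S.toList
  calcALoop1 cs 0 ((cs.length : Int) - 1) 0 0 (cs.length + 1)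

-- ===== PORT B =====
-- _arun of Source B: length of the leading run of 'a' characters
def countA : List Char → Nat
  | [] => 0
  | c :: t => if c == 'a' then countA t + 1 else 0

def calc_py_alt (S : String) : Bool :=
  let cs := S.toList
  let n := cs.length
  let lc := countA cs
  let rc := countA cs.reverse
  if lc > rc then false
  else
    let core := PySem.List.slice cs (some (lc : Int)) (some ((n : Int) - (rc : Int)))
    core == core.reverse

-- ===== PRECONDITION & SPEC =====
-- Pre_ excludes only the empty string, on which A raises IndexError (it reads S[0]).
def Pre_calc_py (S : String) : Prop := S ≠ ""
instance (S : String) : Decidable (Pre_calc_py S) := by unfold Pre_calc_py; infer_instance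

def pvWitness_calc_py : String := "ab"

-- On the empty string A raises IndexError while B returns True.
def Raises_calc_py (S : String) : Prop := S = ""
instance (S : String) : Decidable (Raises_calc_py S) := by unfold Raises_calc_py; infer_instance
def pvRaiseWitness_calc_py : String := ""
def pvRaiseWitnessOut_calc_py : Bool := true

def Spec_calc_py (S : String) (out : Bool) : Prop := out = calc_py_alt S
instance (S : String) (out : Bool) : Decidable (Spec_calc_py S out) := by unfold Spec_calc_py; infer_instance

-- ===== CLAIM (what is proved, stated in full; the proofs are below) =====
def Claim_equal_calc_py : Prop := ∀ (S : String), Dom_calc_py S → Pre_calc_py S → Spec_calc_py S (calc_py S)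
def Claim_raises_calc_py : Prop := (∀ (S : String), Dom_calc_py S → Raises_calc_py S → ¬ Pre_calc_py S) ∧ (Dom_calc_py (pvRaiseWitness_calc_py) ∧ Raises_calc_py (pvRaiseWitness_calc_py) ∧ calc_py_alt (pvRaiseWitness_calc_py) = pvRaiseWitnessOut_calc_py)

-- ===== LEMMAS AND PROOFS =====

theorem beq_list_eq_decide (x y : List Char) : (x == y) = decide (x = y) := by
  by_cases h : x = y <;> simp [h]

theorem beq_char_eq_decide (x y : Char) : (x == y) = decide (x = y) := by
  by_cases h : x = y <;> simp [h]

theorem palCheck_peel (a b : Char) (mid : List Char) :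
    ((a :: (mid ++ [b])) == (a :: (mid ++ [b])).reverse)
      = ((a == b) && (mid == mid.reverse)) := by
  have hrev : (a :: (mid ++ [b])).reverse = b :: (mid.reverse ++ [a]) := by simp
  rw [hrev, beq_list_eq_decide, beq_list_eq_decide, beq_char_eq_decide, ← Bool.decide_and]
  apply decide_eq_decide.mpr
  constructor
  · intro h
    have h1 : a = b := by injection h
    have h2 : mid ++ [b] = mid.reverse ++ [a] := by injection h
    subst h1
    exact ⟨rfl, by simpa using h2⟩
  · rintro ⟨rfl, h2⟩
    rw [List.cons.injEq]
    exact ⟨rfl, by rw [← h2]⟩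

theorem countA_le (cs : List Char) : countA cs ≤ cs.length := by
  induction cs with
  | nil => simp [countA]
  | cons c t ih => by_cases h : c = 'a' <;> simp [countA, h] <;> omega

theorem getElem_lt_countA (cs : List Char) (i : Nat) (h : i < countA cs)
    (h2 : i < cs.length) : cs[i] = 'a' := by
  induction cs generalizing i with
  | nil => simp at h2
  | cons c t ih =>
    by_cases hc : c = 'a'
    · cases i with
      | zero => simpa using hc
      | succ j =>
        simp only [countA, hc] at h
        simp only [beq_self_eq_true, if_pos] at h
        simpa using ih j (by omega) (by simpa using h2)
    · simp [countA, hc] at h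

theorem getElem_countA_ne (cs : List Char) (h : countA cs < cs.length) :
    cs[countA cs] ≠ 'a' := by
  induction cs with
  | nil => simp at h
  | cons c t ih =>
    by_cases hc : c = 'a'
    · simp only [countA, hc, beq_self_eq_true, if_pos] at h ⊢
      simpa using ih (by simpa using h)
    · simpa [countA, hc] using hc

theorem countA_le_of_ne (cs : List Char) (i : Nat) (h2 : i < cs.length)
    (h : cs[i] ≠ 'a') : countA cs ≤ i := by
  by_contra hlt
  exact h (getElem_lt_countA cs i (by omega) h2)

theorem countA_eq_length_of_all (cs : List Char)
    (hall : ∀ i (h : i < cs.length), cs[i] = 'a') : countA cs = cs.length := by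
  induction cs with
  | nil => simp [countA]
  | cons c t ih =>
    have hc : c = 'a' := by simpa using hall 0 (by simp)
    have ht := ih (fun i h => by simpa using hall (i+1) (by simpa using h))
    simp [countA, hc, ht]

theorem core_cons (cs : List Char) (l r : Nat) (hlr : l ≤ r) (hr : r < cs.length) :
    (cs.drop l).take (r + 1 - l) = cs[l]'(by omega) :: (cs.drop (l+1)).take (r - l) := by
  rw [List.drop_eq_getElem_cons (by omega)]
  rw [show r + 1 - l = (r - l) + 1 by omega]
  rfl

theorem core_concat (cs : List Char) (l r : Nat) (hlr : l < r) (hr : r < cs.length) :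
    (cs.drop (l+1)).take (r - l) = (cs.drop (l+1)).take (r - l - 1) ++ [cs[r]'hr] := by
  rw [show r - l = (r - l - 1) + 1 by omega, List.take_succ]
  congr 1
  rw [List.getElem?_drop]
  rw [show l + 1 + (r - l - 1) = r by omega]
  simp [hr]

-- the second loop computes reverse-and-compare of the slice cs[l..r]
theorem pyGet?_nat (cs : List Char) (l : Nat) (hl : l < cs.length) :
    PySem.List.pyGet? cs (l : Int) = some (cs[l]'hl) := by
  simp [PySem.List.pyGet?_natCast, List.getElem?_eq_getElem, hl]

theorem loop2_main (cs : List Char) :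
    ∀ (fuel l r : Nat), l < r → r < cs.length → r - l ≤ fuel →
    calcALoop2 cs (l : Int) (r : Int) fuel
      = ((cs.drop l).take (r + 1 - l) == ((cs.drop l).take (r + 1 - l)).reverse) := by
  intro fuel
  induction fuel with
  | zero => intro l r h1 h2 h3; omega
  | succ f ih =>
    intro l r h1 h2 h3
    have hl : l < cs.length := by omega
    have hcore : (cs.drop l).take (r + 1 - l)
        = cs[l]'hl :: ((cs.drop (l+1)).take (r - l - 1) ++ [cs[r]'h2]) := by
      rw [core_cons cs l r (by omega) h2, core_concat cs l r h1 h2]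
    rw [hcore, palCheck_peel]
    simp only [calcALoop2, pyGet?_nat cs l hl, pyGet?_nat cs r h2]
    by_cases heq : (cs[l]'hl) = (cs[r]'h2)
    · have hbeq : ((cs[l]'hl) == (cs[r]'h2)) = true := by simp [heq]
      rw [if_pos hbeq, hbeq, Bool.true_and]
      rcases (show r = l + 1 ∨ r = l + 2 ∨ l + 2 < r by omega) with hr | hr | hr
      · subst hr
        rw [if_pos (show (l:Int) + 1 ≥ ((l+1 : Nat) : Int) - 1 by push_cast; omega)]
        have hc1 : (l:Int) + 1 = ((l+1 : Nat) : Int) := by omega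
        have hc2 : ((l+1 : Nat) : Int) - 1 = ((l : Nat) : Int) := by push_cast; omega
        rw [hc1, hc2, pyGet?_nat cs (l+1) (by omega), pyGet?_nat cs l hl]
        have h0 : l + 1 - l - 1 = 0 := by omega
        simp [h0, ← heq]
      · subst hr
        rw [if_pos (show (l:Int) + 1 ≥ ((l+2 : Nat) : Int) - 1 by push_cast; omega)]
        have hc1 : (l:Int) + 1 = ((l+1 : Nat) : Int) := by omega
        have hc2 : ((l+2 : Nat) : Int) - 1 = ((l+1 : Nat) : Int) := by push_cast; omega
        rw [hc1, hc2, pyGet?_nat cs (l+1) (by omega)]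
        have h1' : l + 2 - l - 1 = l + 1 + 1 - (l + 1) := by omega
        rw [h1', core_cons cs (l+1) (l+1) (by omega) (by omega)]
        simp [hbeq]
      · rw [if_neg (show ¬ ((l:Int) + 1 ≥ (r:Int) - 1) by omega)]
        have hc1 : (l:Int) + 1 = ((l+1 : Nat) : Int) := by omega
        have hc2 : (r:Int) - 1 = ((r-1 : Nat) : Int) := by omega
        rw [hc1, hc2, ih (l+1) (r-1) (by omega) (by omega) (by omega)]
        have harith : r - 1 + 1 - (l + 1) = r - l - 1 := by omega
        rw [harith]
    · have hbeq : ((cs[l]'hl) == (cs[r]'h2)) = false := by simp [heq]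
      rw [if_neg (by simp [hbeq]), hbeq, Bool.false_and]

-- the first loop on an all-'a' string returns true
theorem loop1_allA (cs : List Char) (hall : ∀ i (h : i < cs.length), cs[i] = 'a') :
    ∀ (fuel l : Nat), l < cs.length → cs.length ≤ fuel + l →
    calcALoop1 cs (l : Int) ((cs.length : Int) - 1 - (l : Int)) (l : Int) (l : Int) fuel = true := by
  intro fuel
  induction fuel with
  | zero => intro l h1 h2; omega
  | succ f ih =>
    intro l h1 h2
    have hc : (cs.length : Int) - 1 - (l : Int) = ((cs.length - 1 - l : Nat) : Int) := by omega
    have hcl : ((cs[l]'h1) == 'a') = true := by simp [hall l h1]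
    have hcr : ((cs[cs.length - 1 - l]'(by omega)) == 'a') = true := by
      simp [hall (cs.length - 1 - l) (by omega)]
    simp only [calcALoop1, hc, pyGet?_nat cs l h1, pyGet?_nat cs (cs.length - 1 - l) (by omega),
      hcl, hcr, if_true]
    by_cases hstop : 2 * l + 3 ≥ cs.length
    · rw [if_pos (show (l:Int) + 1 ≥ ((cs.length - 1 - l : Nat) : Int) - 1 by omega)]
      rw [if_neg (show ¬ ((l:Int) + 1 > (l:Int) + 1) by omega)]
    · rw [if_neg (show ¬ ((l:Int) + 1 ≥ ((cs.length - 1 - l : Nat) : Int) - 1) by omega)]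
      have hc1 : (l:Int) + 1 = ((l + 1 : Nat) : Int) := by omega
      have hc2 : ((cs.length - 1 - l : Nat) : Int) - 1 = ((cs.length - 1 - (l+1) : Nat) : Int) := by
        omega
      rw [hc1, hc2, pyGet?_nat cs (l+1) (by omega), pyGet?_nat cs (cs.length - 1 - (l+1)) (by omega)]
      have hcl2 : ((cs[l+1]'(by omega)) != 'a') = false := by simp [hall (l+1) (by omega)]
      simp only [hcl2, Bool.false_and, Bool.false_eq_true, if_false]
      have hc3 : ((cs.length - 1 - (l+1) : Nat) : Int) = (cs.length : Int) - 1 - ((l+1 : Nat) : Int) := by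
        omega
      rw [hc3]
      exact ih (l+1) (by omega) (by omega)

-- B's value (the reverse-and-compare of the core slice, guarded by the count test)
def rhsB (cs : List Char) : Bool :=
  if countA cs > countA cs.reverse then false
  else ((cs.drop (countA cs)).take (cs.length - countA cs.reverse - countA cs)
     == ((cs.drop (countA cs)).take (cs.length - countA cs.reverse - countA cs)).reverse)

theorem getElem_reverse_a (cs : List Char) (i : Nat) (h : i < cs.length) :
    (cs.reverse)[i]'(by simpa using h) = cs[cs.length - 1 - i]'(by omega) := by
  rw [List.getElem_reverse]

theorem countA_rev_le (cs : List Char) (hL : countA cs < cs.length) :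
    countA cs.reverse ≤ cs.length - 1 - countA cs := by
  apply countA_le_of_ne cs.reverse (cs.length - 1 - countA cs) (by simpa using by omega)
  rw [getElem_reverse_a cs (cs.length - 1 - countA cs) (by omega)]
  have h : cs.length - 1 - (cs.length - 1 - countA cs) = countA cs := by omega
  simp only [h]
  exact getElem_countA_ne cs hL

-- the first loop, when the string is not all 'a's, computes B's value
theorem loop1_main (cs : List Char) (hL : countA cs < cs.length) :
    ∀ (fuel l rc : Nat), l ≤ countA cs → rc ≤ countA cs.reverse →
    (countA cs - l) + (countA cs.reverse - rc) < fuel →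
    calcALoop1 cs (l : Int) ((cs.length : Int) - 1 - (rc : Int)) (l : Int) (rc : Int) fuel
      = rhsB cs := by
  have hpa : cs[countA cs]'hL ≠ 'a' := getElem_countA_ne cs hL
  have hRle : countA cs.reverse ≤ cs.length - 1 - countA cs := countA_rev_le cs hL
  intro fuel
  induction fuel with
  | zero => intro l rc h1 h2 h3; omega
  | succ f ih =>
    intro l rc h1 h2 h3
    have hln : l < cs.length := by omega
    have hrn : cs.length - 1 - rc < cs.length := by omega
    -- the common continuation after the two strip-steps of one iteration
    have step : ∀ (l1 rc1 : Nat) (hl1 : l1 < cs.length) (hr1 : cs.length - 1 - rc1 < cs.length),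
        l1 ≤ countA cs → rc1 ≤ countA cs.reverse →
        ((countA cs - l1) + (countA cs.reverse - rc1) < f ∨
          (l1 = countA cs ∧ rc1 = countA cs.reverse)) →
        (if ((l1 : Nat) : Int) ≥ ((cs.length - 1 - rc1 : Nat) : Int) then
          (if ((l1 : Nat) : Int) > ((rc1 : Nat) : Int) then false else true)
         else
          if ((cs[l1]'hl1) != 'a' && ((cs[cs.length - 1 - rc1]'hr1) != 'a')) = true then
            if ((l1 : Nat) : Int) > ((rc1 : Nat) : Int) then false
            else calcALoop2 cs ((l1 : Nat) : Int) ((cs.length - 1 - rc1 : Nat) : Int)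
                   (cs.length + 1)
          else calcALoop1 cs ((l1 : Nat) : Int) ((cs.length - 1 - rc1 : Nat) : Int)
                 ((l1 : Nat) : Int) ((rc1 : Nat) : Int) f) = rhsB cs := by
      intro l1 rc1 hl1 hr1 g1 g2 gm
      by_cases hge : ((l1 : Nat) : Int) ≥ ((cs.length - 1 - rc1 : Nat) : Int)
      · rw [if_pos hge]
        have heqs : l1 = countA cs ∧ rc1 = countA cs.reverse ∧
            countA cs = cs.length - 1 - countA cs.reverse := by omega
        obtain ⟨e1, e2, e3⟩ := heqs
        subst e1; subst e2
        unfold rhsB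
        by_cases hpr : countA cs > countA cs.reverse
        · rw [if_pos (by omega : ((countA cs : Nat) : Int) > ((countA cs.reverse : Nat) : Int)),
            if_pos hpr]
        · rw [if_neg (by omega : ¬ ((countA cs : Nat) : Int) > ((countA cs.reverse : Nat) : Int)),
            if_neg hpr]
          have hone : cs.length - countA cs.reverse - countA cs = countA cs + 1 - countA cs := by
            omega
          rw [hone, core_cons cs (countA cs) (countA cs) (by omega) hL]
          simp
      · rw [if_neg hge]
        have hl1n : l1 < cs.length - 1 - rc1 := by omega
        by_cases hbk : l1 = countA cs ∧ rc1 = countA cs.reverse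
        · obtain ⟨e1, e2⟩ := hbk
          subst e1; subst e2
          have hca : ((cs[countA cs]'hL) != 'a') = true := by simpa using hpa
          have hrne : cs[cs.length - 1 - countA cs.reverse]'(by omega) ≠ 'a' := by
            have hR : countA cs.reverse < cs.reverse.length := by simpa using by omega
            have := getElem_countA_ne cs.reverse hR
            rwa [getElem_reverse_a cs (countA cs.reverse) (by omega)] at this
          have hcb : ((cs[cs.length - 1 - countA cs.reverse]'(by omega)) != 'a') = true := by
            simpa using hrne
          simp only [hca, hcb, Bool.true_and, if_true]
          unfold rhsB
          by_cases hpr : countA cs > countA cs.reverse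
          · rw [if_pos (by omega : ((countA cs : Nat) : Int) > ((countA cs.reverse : Nat) : Int)),
              if_pos hpr]
          · rw [if_neg (by omega : ¬ ((countA cs : Nat) : Int) > ((countA cs.reverse : Nat) : Int)),
              if_neg hpr]
            rw [loop2_main cs (cs.length + 1) (countA cs) (cs.length - 1 - countA cs.reverse)
              (by omega) (by omega) (by omega)]
            have : cs.length - 1 - countA cs.reverse + 1 - countA cs
                = cs.length - countA cs.reverse - countA cs := by omega
            rw [this]
        · have hmeas : (countA cs - l1) + (countA cs.reverse - rc1) < f := by
            rcases gm with gm | gm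
            · exact gm
            · exact absurd gm hbk
          have hcont : (((cs[l1]'(by omega)) != 'a') && ((cs[cs.length - 1 - rc1]'(by omega)) != 'a')) = false := by
            rcases (show l1 < countA cs ∨ rc1 < countA cs.reverse by omega) with hlt | hlt
            · have := getElem_lt_countA cs l1 hlt (by omega)
              simp [this]
            · have hRn : rc1 < cs.reverse.length := by simpa using by omega
              have := getElem_lt_countA cs.reverse rc1 hlt hRn
              rw [getElem_reverse_a cs rc1 (by omega)] at this
              simp [this]
          simp only [hcont, Bool.false_eq_true, if_false]
          have hc' : ((cs.length - 1 - rc1 : Nat) : Int) = (cs.length : Int) - 1 - (rc1 : Int) := by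
            omega
          rw [hc']
          exact ih l1 rc1 g1 g2 hmeas
    -- now unfold one iteration of the loop and reduce to `step`
    have hcr : (cs.length : Int) - 1 - (rc : Int) = ((cs.length - 1 - rc : Nat) : Int) := by omega
    by_cases hl : l < countA cs
    · have hca : ((cs[l]'hln) == 'a') = true := by
        simp [getElem_lt_countA cs l hl hln]
      by_cases hrc : rc < countA cs.reverse
      · have hRn : rc < cs.reverse.length := by simpa using by omega
        have hcb : ((cs[cs.length - 1 - rc]'hrn) == 'a') = true := by
          have := getElem_lt_countA cs.reverse rc hrc hRn
          rw [getElem_reverse_a cs rc (by omega)] at this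
          simp [this]
        simp only [calcALoop1, hcr, pyGet?_nat cs l hln, pyGet?_nat cs (cs.length - 1 - rc) hrn,
          hca, hcb, if_true]
        have e1 : (l : Int) + 1 = ((l + 1 : Nat) : Int) := by omega
        have e2 : ((cs.length - 1 - rc : Nat) : Int) - 1 = ((cs.length - 1 - (rc + 1) : Nat) : Int) := by
          omega
        have e3 : (rc : Int) + 1 = ((rc + 1 : Nat) : Int) := by omega
        rw [e1, e2, e3]
        simp only [pyGet?_nat cs (l+1) (by omega), pyGet?_nat cs (cs.length - 1 - (rc+1)) (by omega)]
        exact step (l + 1) (rc + 1) (by omega) (by omega) (by omega) (by omega) (by omega)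
      · have hrcE : rc = countA cs.reverse := by omega
        have hcb : ((cs[cs.length - 1 - rc]'hrn) == 'a') = false := by
          subst hrcE
          have hR : countA cs.reverse < cs.reverse.length := by simpa using by omega
          have := getElem_countA_ne cs.reverse hR
          rw [getElem_reverse_a cs (countA cs.reverse) (by omega)] at this
          simpa using this
        simp only [calcALoop1, hcr, pyGet?_nat cs l hln, pyGet?_nat cs (cs.length - 1 - rc) hrn,
          hca, hcb, if_true, Bool.false_eq_true, if_false]
        have e1 : (l : Int) + 1 = ((l + 1 : Nat) : Int) := by omega
        rw [e1]
        simp only [pyGet?_nat cs (l+1) (by omega)]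
        exact step (l + 1) rc (by omega) (by omega) (by omega) (by omega) (by omega)
    · have hlE : l = countA cs := by omega
      have hca : ((cs[l]'hln) == 'a') = false := by
        subst hlE; simpa using hpa
      by_cases hrc : rc < countA cs.reverse
      · have hRn : rc < cs.reverse.length := by simpa using by omega
        have hcb : ((cs[cs.length - 1 - rc]'hrn) == 'a') = true := by
          have := getElem_lt_countA cs.reverse rc hrc hRn
          rw [getElem_reverse_a cs rc (by omega)] at this
          simp [this]
        simp only [calcALoop1, hcr, pyGet?_nat cs l hln, pyGet?_nat cs (cs.length - 1 - rc) hrn,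
          hca, hcb, if_true, Bool.false_eq_true, if_false]
        have e2 : ((cs.length - 1 - rc : Nat) : Int) - 1 = ((cs.length - 1 - (rc + 1) : Nat) : Int) := by
          omega
        have e3 : (rc : Int) + 1 = ((rc + 1 : Nat) : Int) := by omega
        rw [e2, e3]
        simp only [pyGet?_nat cs (cs.length - 1 - (rc+1)) (by omega)]
        exact step l (rc + 1) (by omega) (by omega) (by omega) (by omega) (by omega)
      · have hrcE : rc = countA cs.reverse := by omega
        have hcb : ((cs[cs.length - 1 - rc]'hrn) == 'a') = false := by
          subst hrcE
          have hR : countA cs.reverse < cs.reverse.length := by simpa using by omega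
          have := getElem_countA_ne cs.reverse hR
          rw [getElem_reverse_a cs (countA cs.reverse) (by omega)] at this
          simpa using this
        simp only [calcALoop1, hcr, pyGet?_nat cs l hln, pyGet?_nat cs (cs.length - 1 - rc) hrn,
          hca, hcb, Bool.false_eq_true, if_false]
        exact step l rc hln hrn h1 h2 (Or.inr ⟨hlE, hrcE⟩)

-- ===== VERDICT (by name: the statement is the Claim_ definition above) =====
theorem calc_py_spec : Claim_equal_calc_py := by
  intro S hdom hpre
  unfold Spec_calc_py calc_py calc_py_alt
  have hne : S.toList ≠ [] := by
    intro h
    exact hpre (String.toList_eq_nil_iff.mp h)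
  set cs := S.toList with hcs
  have hn : 1 ≤ cs.length := List.length_pos_of_ne_nil hne
  by_cases hall : countA cs = cs.length
  · have hA := loop1_allA cs (fun i h => getElem_lt_countA cs i (by omega) h)
      (cs.length + 1) 0 (by omega) (by omega)
    simp only [Nat.cast_zero, sub_zero] at hA
    rw [hA]
    have hRev : countA cs.reverse = cs.length := by
      have := countA_eq_length_of_all cs.reverse (fun i h => by
        rw [getElem_reverse_a cs i (by simpa using h)]
        exact getElem_lt_countA cs _ (by omega) (by omega))
      simpa using this
    rw [if_neg (by omega)]
    have hb : ((cs.length : Int) - (countA cs.reverse : Int)) = (((0:Nat)) : Int) := by omega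
    rw [hb, PySem.List.slice_natCast]
    simp [hall]
  · have hL : countA cs < cs.length := lt_of_le_of_ne (countA_le cs) hall
    have hRle := countA_rev_le cs hL
    have hA := loop1_main cs hL (cs.length + 1) 0 0 (by omega) (by omega) (by omega)
    simp only [Nat.cast_zero, sub_zero] at hA
    rw [hA]
    unfold rhsB
    by_cases hpr : countA cs > countA cs.reverse
    · rw [if_pos hpr, if_pos hpr]
    · rw [if_neg hpr, if_neg hpr]
      have hb : ((cs.length : Int) - (countA cs.reverse : Int))
          = ((cs.length - countA cs.reverse : Nat) : Int) := by omega
      rw [hb, PySem.List.slice_natCast]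

theorem calc_py_raises : Claim_raises_calc_py := by
  unfold Claim_raises_calc_py
  exact ⟨fun S _ h hp => hp h, by decide⟩

-- self-check that the raise-witness facts are exactly what calc_py_raises certifies
theorem calc_py_raises_ok :
    Raises_calc_py (pvRaiseWitness_calc_py) ∧
      calc_py_alt (pvRaiseWitness_calc_py) = pvRaiseWitnessOut_calc_py :=
  ⟨calc_py_raises.2.2.1, calc_py_raises.2.2.2⟩
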